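-- pv_equiv track=rewrite | github.com/Alectriciti/comfyui-adaptiveprompts | generator.py | _find_top_level_dollars
-- ===== SOURCE A (Python) =====
-- def _find_top_level_dollars(s: str) -> list[int]:
--     """
--     Return indices where top-level '$$' occurs (i.e., not inside nested {...} groups).
--     """
--     indices = []
--     depth = 0
--     i = 0
--     L = len(s)
--     while i < L:
--         c = s[i]
--         if c == "{":
--             depth += 1
--             i += 1
--             continue
--         if c == "}":
--             if depth > 0:
--                 depth -= 1
--             i += 1
--             continue
--         if depth == 0 and s.startswith("$$", i):
--             indices.append(i)
--             i += 2
--             continue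
--         i += 1
--     return indices
-- ===== SOURCE B (Python) =====
-- def _find_top_level_dollars(s: str) -> list[int]:
--     # Pass 1: depth (floored at 0) before each position.
--     depths = []
--     d = 0
--     for c in s:
--         depths.append(d)
--         if c == '{':
--             d += 1
--         elif c == '}' and d > 0:
--             d -= 1
--     # Pass 2: jump between occurrences of '$$' with str.find.
--     out = []
--     start = 0
--     while True:
--         j = s.find('$$', start)
--         if j < 0:
--             break
--         if depths[j] == 0:
--             out.append(j)
--             start = j + 2
--         else:
--             start = j + 1
--     return out
-- ===== Notes on version B (the rewrite author's own statement) =====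
-- stated objective: faster
-- what changed: Replaces the single char-by-char state machine with two passes: one pass precomputing the brace depth before every position, then a jump loop driven by str.find('$$', start) that skips directly between candidate occurrences.
import Mathlib
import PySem

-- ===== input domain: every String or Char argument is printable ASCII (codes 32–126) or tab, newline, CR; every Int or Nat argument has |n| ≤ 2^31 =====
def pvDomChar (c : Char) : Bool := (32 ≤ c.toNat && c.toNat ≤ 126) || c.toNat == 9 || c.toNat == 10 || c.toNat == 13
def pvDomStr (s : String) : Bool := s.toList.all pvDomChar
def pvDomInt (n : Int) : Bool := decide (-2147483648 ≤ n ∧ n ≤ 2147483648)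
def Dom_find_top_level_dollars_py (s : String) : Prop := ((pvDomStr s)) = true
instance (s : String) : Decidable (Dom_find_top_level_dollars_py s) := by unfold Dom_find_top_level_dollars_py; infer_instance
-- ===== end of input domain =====

-- B replaces A's single char-by-char state machine by two passes (depth array, then a
-- find-driven jump loop); same O(n) cost, alternative decomposition. A is total.

-- ===== PORT A =====
-- literal port of A's while loop: index i, floored depth, appended indices; the while
-- loop is rendered with a fuel counter (s.length steps always suffice: i grows each turn).
-- s.startswith("$$", i) with 0 ≤ i is exactly "chars i and i+1 are both '$'".
def aGo (s : List Char) (fuel i depth : Nat) (acc : List Int) : List Int :=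
  match fuel with
  | 0 => acc
  | fuel+1 =>
    if h : i < s.length then
      let c := s[i]
      if c = '{' then aGo s fuel (i+1) (depth+1) acc
      else if c = '}' then aGo s fuel (i+1) (if depth > 0 then depth - 1 else depth) acc
      else if depth = 0 ∧ s[i]? = some '$' ∧ s[i+1]? = some '$' then
        aGo s fuel (i+2) depth (acc ++ [(i : Int)])
      else aGo s fuel (i+1) depth acc
    else acc

def find_top_level_dollars_py (s : String) : List Int :=
  aGo s.toList s.toList.length 0 0 []

-- ===== PORT B =====
-- pass 1 of Source B: depths[k] = brace depth (floored at 0) before position k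
def depthsGo (cs : List Char) (d : Nat) : List Nat :=
  match cs with
  | [] => []
  | c :: rest =>
      d :: depthsGo rest (if c = '{' then d + 1 else if c = '}' ∧ d > 0 then d - 1 else d)

-- hand port of s.find('$$', start) for 0 ≤ start (exact there: first j ≥ start with
-- s[j] = s[j+1] = '$'; Python's -1 rendered as none, matching Source B's "j < 0" test);
-- the scan is rendered with a fuel counter (s.length steps always suffice)
def findDD (s : List Char) (fuel start : Nat) : Option Nat :=
  match fuel with
  | 0 => none
  | fuel+1 =>
    if start + 2 ≤ s.length then
      if s[start]? = some '$' ∧ s[start+1]? = some '$' then some start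
      else findDD s fuel (start+1)
    else none

-- pass 2 of Source B: the find-driven jump loop, with a fuel counter (s.length+1 turns suffice)
def bLoop (s : List Char) (depths : List Nat) (fuel start : Nat) (acc : List Int) : List Int :=
  match fuel with
  | 0 => acc
  | fuel+1 =>
    match findDD s s.length start with
    | none => acc
    | some j =>
        if PySem.List.pyGet? depths (j : Int) = some 0 then
          bLoop s depths fuel (j+2) (acc ++ [(j : Int)])
        else
          bLoop s depths fuel (j+1) acc

def find_top_level_dollars_py_alt (s : String) : List Int :=
  bLoop s.toList (depthsGo s.toList 0) (s.toList.length + 1) 0 []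

-- ===== PRECONDITION & SPEC =====
def Spec_find_top_level_dollars_py (s : String) (out : List Int) : Prop := out = find_top_level_dollars_py_alt s
instance (s : String) (out : List Int) : Decidable (Spec_find_top_level_dollars_py s out) := by unfold Spec_find_top_level_dollars_py; infer_instance

-- ===== CLAIM (what is proved, stated in full; the proofs are below) =====
def Claim_equal_find_top_level_dollars_py : Prop := ∀ (s : String), Dom_find_top_level_dollars_py s → Spec_find_top_level_dollars_py s (find_top_level_dollars_py s)

-- ===== LEMMAS AND PROOFS =====

-- the common depth-step function and depth-before-position-i
def stepD (c : Char) (d : Nat) : Nat :=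
  if c = '{' then d + 1 else if c = '}' ∧ d > 0 then d - 1 else d

def depthAt (s : List Char) (i : Nat) : Nat :=
  (s.take i).foldl (fun d c => stepD c d) 0

lemma depthAt_succ {s : List Char} {i : Nat} (h : i < s.length) :
    depthAt s (i+1) = stepD s[i] (depthAt s i) := by
  unfold depthAt
  rw [List.take_add_one, List.getElem?_eq_getElem h]
  rw [show (some s[i]).toList = [s[i]] from rfl, List.foldl_append]
  rfl

lemma depthsGo_get : ∀ (cs : List Char) (d i : Nat), i < cs.length →
    (depthsGo cs d)[i]? = some ((cs.take i).foldl (fun a c => stepD c a) d) := by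
  intro cs
  induction cs with
  | nil => intro d i h; simp at h
  | cons c rest ih =>
    intro d i h
    cases i with
    | zero => simp [depthsGo]
    | succ i =>
      simp only [depthsGo, List.getElem?_cons_succ, List.take_succ_cons, List.foldl_cons]
      have : (if c = '{' then d + 1 else if c = '}' ∧ d > 0 then d - 1 else d) = stepD c d := rfl
      rw [this]
      exact ih _ i (by simpa using h)

lemma depthsGo_get0 {s : List Char} {i : Nat} (h : i < s.length) :
    (depthsGo s 0)[i]? = some (depthAt s i) :=
  depthsGo_get s 0 i h

lemma findDD_none_of_ge {s : List Char} {start : Nat} (h : s.length ≤ start + 1) :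
    ∀ f, findDD s f start = none := by
  intro f
  cases f with
  | zero => rfl
  | succ f => rw [findDD, if_neg (by omega)]

-- with enough fuel the result does not depend on the fuel
lemma findDD_irr : ∀ (f f' : Nat) (s : List Char) (start : Nat),
    s.length ≤ start + f → s.length ≤ start + f' →
    findDD s f start = findDD s f' start := by
  intro f
  induction f with
  | zero =>
    intro f' s start h h'
    cases f' with
    | zero => rfl
    | succ f' => rw [findDD, findDD, if_neg (by omega)]
  | succ f ih =>
    intro f' s start h h'
    cases f' with
    | zero => rw [findDD, findDD, if_neg (by omega)]
    | succ f' =>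
      rw [findDD, findDD]
      by_cases hle : start + 2 ≤ s.length
      · rw [if_pos hle, if_pos hle]
        by_cases hm : s[start]? = some '$' ∧ s[start+1]? = some '$'
        · rw [if_pos hm, if_pos hm]
        · rw [if_neg hm, if_neg hm]
          exact ih f' s (start+1) (by omega) (by omega)
      · rw [if_neg hle, if_neg hle]

lemma findDD_hit {s : List Char} {start : Nat}
    (h1 : s[start]? = some '$') (h2 : s[start+1]? = some '$') :
    findDD s s.length start = some start := by
  have hl : start + 2 ≤ s.length := by
    have hs : start + 1 < s.length := by
      by_contra hc
      rw [List.getElem?_eq_none (by omega)] at h2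
      cases h2
    omega
  have hL : ∃ f, s.length = f + 1 := ⟨s.length - 1, by omega⟩
  obtain ⟨f, hf⟩ := hL
  conv_lhs => rw [hf]
  rw [findDD, if_pos (by omega), if_pos ⟨h1, h2⟩]

lemma findDD_skip {s : List Char} {start : Nat}
    (h : ¬ (s[start]? = some '$' ∧ s[start+1]? = some '$')) :
    findDD s s.length start = findDD s s.length (start+1) := by
  have h1 : findDD s s.length start = findDD s (s.length + 1) start :=
    findDD_irr _ _ s start (by omega) (by omega)
  rw [h1, findDD]
  by_cases hle : start + 2 ≤ s.length
  · rw [if_pos hle, if_neg h]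
  · rw [if_neg hle, findDD_none_of_ge (by omega)]

lemma bLoop_none {s : List Char} {D : List Nat} {start : Nat}
    (h : findDD s s.length start = none) :
    ∀ f acc, bLoop s D f start acc = acc := by
  intro f acc
  cases f with
  | zero => rfl
  | succ f => rw [bLoop, h]

lemma bLoop_some {s : List Char} {D : List Nat} {start j f : Nat} (acc : List Int)
    (h : findDD s s.length start = some j) :
    bLoop s D (f+1) start acc =
      (if PySem.List.pyGet? D (j : Int) = some 0 then bLoop s D f (j+2) (acc ++ [(j : Int)])
       else bLoop s D f (j+1) acc) := by
  rw [bLoop, h]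

-- if there is no '$$' at start, the jump loop behaves as if started at start+1
lemma bLoop_skip {s : List Char} {D : List Nat} {start : Nat}
    (h : ¬ (s[start]? = some '$' ∧ s[start+1]? = some '$')) :
    ∀ f acc, bLoop s D f start acc = bLoop s D f (start+1) acc := by
  intro f acc
  cases f with
  | zero => rfl
  | succ f => rw [bLoop, bLoop, findDD_skip h]

-- main invariant: from any aligned position i with A's depth = depthAt s i and enough
-- fuel on both sides, A's scan and B's jump loop produce the same result
lemma main_inv : ∀ (n : Nat) (s : List Char) (i : Nat) (acc : List Int) (fa fb : Nat),
    s.length - i ≤ n → s.length ≤ i + fa → s.length + 1 ≤ i + fb →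
    aGo s fa i (depthAt s i) acc = bLoop s (depthsGo s 0) fb i acc := by
  intro n
  induction n with
  | zero =>
    intro s i acc fa fb h ha hb
    rw [bLoop_none (findDD_none_of_ge (by omega) _)]
    cases fa with
    | zero => rfl
    | succ fa => rw [aGo, dif_neg (by omega)]
  | succ n ih =>
    intro s i acc fa fb h ha hb
    by_cases hi : i < s.length
    · obtain ⟨fa, rfl⟩ : ∃ k, fa = k + 1 := ⟨fa - 1, by omega⟩
      rw [aGo, dif_pos hi]
      by_cases hbr : s[i] = '{'
      · -- '{' : depth+1, both programs move to i+1
        have hd : depthAt s (i+1) = depthAt s i + 1 := by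
          rw [depthAt_succ hi, hbr]; simp [stepD]
        have hnm : ¬ (s[i]? = some '$' ∧ s[i+1]? = some '$') := by
          rw [List.getElem?_eq_getElem hi, hbr]; simp
        have hrec := ih s (i+1) acc fa fb (by omega) (by omega) (by omega)
        rw [hd] at hrec
        rw [if_pos hbr, hrec, ← bLoop_skip hnm]
      · by_cases hbr2 : s[i] = '}'
        · have hd : depthAt s (i+1) = (if depthAt s i > 0 then depthAt s i - 1 else depthAt s i) := by
            rw [depthAt_succ hi, hbr2]; simp only [stepD]
            split <;> split <;> simp_all
          have hnm : ¬ (s[i]? = some '$' ∧ s[i+1]? = some '$') := by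
            rw [List.getElem?_eq_getElem hi, hbr2]; simp
          have hrec := ih s (i+1) acc fa fb (by omega) (by omega) (by omega)
          rw [hd] at hrec
          rw [if_neg hbr, if_pos hbr2, hrec, ← bLoop_skip hnm]
        · by_cases hm : s[i]? = some '$' ∧ s[i+1]? = some '$'
          · -- '$$' at i: both chars are '$', so depth is unchanged over i, i+1
            have hi1 : i + 1 < s.length := by
              by_contra hc
              have := hm.2
              rw [List.getElem?_eq_none (by omega)] at this
              cases this
            have hci : s[i] = '$' := by
              have := hm.1; rw [List.getElem?_eq_getElem hi] at this; simpa using this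
            have hci1 : s[i+1] = '$' := by
              have := hm.2; rw [List.getElem?_eq_getElem hi1] at this; simpa using this
            have h1 : depthAt s (i+1) = depthAt s i := by
              rw [depthAt_succ hi, hci]; simp [stepD]
            have hd2 : depthAt s (i+2) = depthAt s i := by
              rw [show i+2 = (i+1)+1 by ring, depthAt_succ hi1, hci1, h1]
              simp [stepD]
            have hget : PySem.List.pyGet? (depthsGo s 0) ((i : Nat) : Int) = some (depthAt s i) := by
              rw [PySem.List.pyGet?_natCast, depthsGo_get0 hi]
            obtain ⟨fb, rfl⟩ : ∃ k, fb = k + 1 := ⟨fb - 1, by omega⟩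
            by_cases hd0 : depthAt s i = 0
            · have hrec := ih s (i+2) (acc ++ [(i : Int)]) fa fb (by omega) (by omega) (by omega)
              rw [hd2] at hrec
              rw [if_neg hbr, if_neg hbr2, if_pos ⟨hd0, hm⟩, hrec,
                  bLoop_some acc (findDD_hit hm.1 hm.2),
                  if_pos (by rw [hget, hd0])]
            · have hrec := ih s (i+1) acc fa fb (by omega) (by omega) (by omega)
              rw [h1] at hrec
              rw [if_neg hbr, if_neg hbr2, if_neg (by tauto), hrec,
                  bLoop_some acc (findDD_hit hm.1 hm.2),
                  if_neg (by rw [hget]; simpa using hd0)]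
          · -- ordinary char: depth unchanged, both move to i+1
            have hd : depthAt s (i+1) = depthAt s i := by
              rw [depthAt_succ hi]
              simp [stepD, hbr, hbr2]
            have hrec := ih s (i+1) acc fa fb (by omega) (by omega) (by omega)
            rw [hd] at hrec
            rw [if_neg hbr, if_neg hbr2, if_neg (by tauto), hrec, ← bLoop_skip hm]
    · rw [bLoop_none (findDD_none_of_ge (by omega) _)]
      cases fa with
      | zero => rfl
      | succ fa => rw [aGo, dif_neg (by omega)]

-- ===== VERDICT (by name: the statement is the Claim_ definition above) =====
theorem find_top_level_dollars_py_spec : Claim_equal_find_top_level_dollars_py := by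
  intro s _
  unfold Spec_find_top_level_dollars_py find_top_level_dollars_py find_top_level_dollars_py_alt
  have := main_inv s.toList.length s.toList 0 [] s.toList.length (s.toList.length + 1)
    (by omega) (by omega) (by omega)
  simpa [depthAt] using this
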